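-- pv_equiv track=rewrite | github.com/sys-ryan/algorithm-test | 0629/1891.py | gogo
-- ===== SOURCE A (Python) =====
-- def gogo(r, c, size, x, y):
--   if size == 1:
--     return ''
--
--   m = size//2
--   if x < r+m and y < c+m:
--     return '2' + gogo(r, c, m, x, y)
--   elif x < r+size//2 and y >= c+m:
--     return '1' + gogo(r, c+m, m, x, y)
--   elif x >= r+size//2 and y < c+m:
--     return '3' + gogo(r+m, c, m, x, y)
--   else:
--     return '4' + gogo(r+m, c+m, m, x, y)
-- ===== SOURCE B (Python) =====
-- def gogo(r, c, size, x, y):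
--     # Iterative top-down descent: per level decide the half by two flags and
--     # shift the origin additively; join the digits at the end.
--     digits = []
--     while size > 1:
--         m = size // 2
--         down = x >= r + m
--         right = y >= c + m
--         digits.append(('4' if right else '3') if down else ('1' if right else '2'))
--         if down:
--             r += m
--         if right:
--             c += m
--         size = m
--     return ''.join(digits)
-- ===== Notes on version B (the rewrite author's own statement) =====
-- stated objective: simpler
-- what changed: Replaces the four-branch non-tail recursion with an iterative while-loop that classifies each level by two flags (down/right), shifts the origin additively, and joins the digits at the end.
import Mathlib
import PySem

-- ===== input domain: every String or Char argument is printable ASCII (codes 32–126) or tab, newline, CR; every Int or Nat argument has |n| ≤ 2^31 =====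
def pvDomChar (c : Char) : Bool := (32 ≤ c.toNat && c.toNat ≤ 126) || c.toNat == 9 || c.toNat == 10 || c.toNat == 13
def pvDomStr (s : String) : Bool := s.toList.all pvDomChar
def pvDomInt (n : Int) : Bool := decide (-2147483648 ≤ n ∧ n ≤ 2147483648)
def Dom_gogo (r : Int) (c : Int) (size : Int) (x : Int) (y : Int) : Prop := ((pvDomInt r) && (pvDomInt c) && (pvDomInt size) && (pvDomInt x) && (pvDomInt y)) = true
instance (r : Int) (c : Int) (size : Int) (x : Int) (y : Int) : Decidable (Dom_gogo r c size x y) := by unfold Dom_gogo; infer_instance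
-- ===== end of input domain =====

-- B replaces A's four-branch recursion with an iterative flag-based descent; equivalence is about the return value.

-- ===== PORT A =====
-- Literal port of A's recursion; the fuel only makes the recursion total
-- (under Pre_gogo, size ≥ 1, the fuel size.toNat + 1 is never exhausted).
def gogoA : Nat → Int → Int → Int → Int → Int → List Char
  | 0, _, _, _, _, _ => []
  | fuel + 1, r, c, size, x, y =>
    if size = 1 then []
    else
      let m := PySem.Int.floordiv size 2
      if x < r + m ∧ y < c + m then '2' :: gogoA fuel r c m x y
      else if x < r + PySem.Int.floordiv size 2 ∧ y ≥ c + m then '1' :: gogoA fuel r (c + m) m x y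
      else if x ≥ r + PySem.Int.floordiv size 2 ∧ y < c + m then '3' :: gogoA fuel (r + m) c m x y
      else '4' :: gogoA fuel (r + m) (c + m) m x y

def gogo (r : Int) (c : Int) (size : Int) (x : Int) (y : Int) : String :=
  String.ofList (gogoA (size.toNat + 1) r c size x y)

-- ===== PORT B =====
-- Port of Source B's while-loop: accumulator of digits, flag-driven origin shifts.
def gogoB (acc : List Char) (r : Int) (c : Int) (size : Int) (x : Int) (y : Int) : List Char :=
  if h : 1 < size then
    let m := PySem.Int.floordiv size 2
    let down := x ≥ r + m
    let right := y ≥ c + m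
    gogoB (acc ++ [if down then (if right then '4' else '3') else (if right then '1' else '2')])
      (if down then r + m else r) (if right then c + m else c) m x y
  else acc
termination_by size.toNat
decreasing_by
  rw [PySem.Int.floordiv_eq_ediv_of_pos (by omega : (0:Int) < 2)]
  omega

def gogo_alt (r : Int) (c : Int) (size : Int) (x : Int) (y : Int) : String :=
  String.ofList (gogoB [] r c size x y)

-- ===== PRECONDITION & SPEC =====
-- Pre_ excludes exactly size ≤ 0, where A's recursion never reaches its base case and raises RecursionError.
def Pre_gogo (r : Int) (c : Int) (size : Int) (x : Int) (y : Int) : Prop := 1 ≤ size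
instance (r : Int) (c : Int) (size : Int) (x : Int) (y : Int) : Decidable (Pre_gogo r c size x y) := by unfold Pre_gogo; infer_instance
def pvWitness_gogo : Int × Int × Int × Int × Int := (0, 0, 8, 3, 5)

def Spec_gogo (r : Int) (c : Int) (size : Int) (x : Int) (y : Int) (out : String) : Prop := out = gogo_alt r c size x y
instance (r : Int) (c : Int) (size : Int) (x : Int) (y : Int) (out : String) : Decidable (Spec_gogo r c size x y out) := by unfold Spec_gogo; infer_instance

-- ===== CLAIM (what is proved, stated in full; the proofs are below) =====
def Claim_equal_gogo : Prop := ∀ (r : Int) (c : Int) (size : Int) (x : Int) (y : Int), Dom_gogo r c size x y → Pre_gogo r c size x y → Spec_gogo r c size x y (gogo r c size x y)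
-- ===== LEMMAS AND PROOFS =====
-- Loop invariant: with enough fuel, B's accumulator loop is acc ++ A's recursion.
theorem gogoB_eq_gogoA (fuel : Nat) : ∀ (acc : List Char) (r c size x y : Int),
    1 ≤ size → size.toNat ≤ fuel →
    gogoB acc r c size x y = acc ++ gogoA fuel r c size x y := by
  induction fuel with
  | zero => intro acc r c size x y h1 h2; omega
  | succ fuel ih =>
    intro acc r c size x y h1 h2
    by_cases hs : size = 1
    · subst hs
      rw [gogoB.eq_def, gogoA]
      simp
    · have hlt : 1 < size := by omega
      have hm : PySem.Int.floordiv size 2 = size / 2 :=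
        PySem.Int.floordiv_eq_ediv_of_pos (by omega)
      have hm1 : 1 ≤ PySem.Int.floordiv size 2 := by rw [hm]; omega
      have hmf : (PySem.Int.floordiv size 2).toNat ≤ fuel := by rw [hm]; omega
      rw [gogoB.eq_def, gogoA]
      simp only [dif_pos hlt, if_neg hs]
      split_ifs
      all_goals try omega
      all_goals (rw [ih _ _ _ _ _ _ hm1 hmf]; simp)

-- ===== VERDICT (by name: the statement is the Claim_ definition above) =====
theorem gogo_spec : Claim_equal_gogo := by
  intro r c size x y _ hpre
  unfold Spec_gogo gogo gogo_alt
  rw [gogoB_eq_gogoA (size.toNat + 1) [] r c size x y hpre (by omega)]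
  simp
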